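-- pv_equiv track=rewrite | github.com/jenniferanne1991/project_euler_code | problem_273.py | squarefree_numbers
-- ===== SOURCE A (Python) =====
-- def squarefree_numbers(factors):
-- 	if len(factors) == 0:
-- 		return []
-- 	first = factors[0]
-- 	ans = [first]
-- 	factors.pop(0)
-- 	temp = squarefree_numbers(factors)
-- 	ans.extend(temp)
-- 	ans.extend([i*first for i in temp])
-- 	return ans
-- ===== SOURCE B (Python) =====
-- def squarefree_numbers(factors):
--     acc = []
--     while factors:
--         x = factors.pop()
--         acc = [x] + acc + [i * x for i in acc]
--     return acc
-- ===== Notes on version B (the rewrite author's own statement) =====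
-- stated objective: alternative
-- what changed: Replaces head-recursion with an explicit iterative loop popping from the end of the list, accumulating the subset products back-to-front; it preserves A's exact output order and its side-effect of emptying the input list.
import Mathlib
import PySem

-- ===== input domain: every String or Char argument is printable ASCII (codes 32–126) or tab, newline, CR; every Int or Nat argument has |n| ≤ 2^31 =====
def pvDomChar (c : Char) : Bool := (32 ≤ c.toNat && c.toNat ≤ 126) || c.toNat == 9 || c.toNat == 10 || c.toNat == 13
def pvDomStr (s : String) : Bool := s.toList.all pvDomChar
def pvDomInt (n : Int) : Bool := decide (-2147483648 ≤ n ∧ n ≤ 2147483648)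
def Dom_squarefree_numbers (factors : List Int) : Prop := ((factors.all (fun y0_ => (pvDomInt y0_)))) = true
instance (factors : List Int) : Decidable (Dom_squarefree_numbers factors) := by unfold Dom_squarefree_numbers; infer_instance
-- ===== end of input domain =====

-- B replaces A's head-recursion with an iterative loop popping from the end of the list (objective: alternative decomposition); both empty the input list in Python — equivalence here is about the return value.


-- ===== PORT A =====
-- Recursive transliteration of A: [] -> []; else first :: temp ++ [i*first for i in temp].
def squarefree_numbers (factors : List Int) : List Int :=
  match factors with
  | [] => []
  | first :: rest =>
    let temp := squarefree_numbers rest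
    first :: (temp ++ temp.map (fun i => i * first))

-- ===== PORT B =====
-- B: iterative loop popping from the end = fold over the reversed list.
def squarefree_numbers_alt (factors : List Int) : List Int :=
  factors.reverse.foldl (fun acc x => x :: (acc ++ acc.map (fun i => i * x))) []

-- ===== PRECONDITION & SPEC =====
def Spec_squarefree_numbers (factors : List Int) (out : List Int) : Prop := out = squarefree_numbers_alt factors
instance (factors : List Int) (out : List Int) : Decidable (Spec_squarefree_numbers factors out) := by unfold Spec_squarefree_numbers; infer_instance

-- ===== CLAIM (what is proved, stated in full; the proofs are below) =====
def Claim_equal_squarefree_numbers : Prop := ∀ (factors : List Int), Dom_squarefree_numbers factors → Spec_squarefree_numbers factors (squarefree_numbers factors)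

-- ===== LEMMAS AND PROOFS =====

theorem alt_cons (a : Int) (rest : List Int) :
    squarefree_numbers_alt (a :: rest) =
      a :: (squarefree_numbers_alt rest ++ (squarefree_numbers_alt rest).map (fun i => i * a)) := by
  simp [squarefree_numbers_alt, List.foldl_append]

-- ===== VERDICT (by name: the statement is the Claim_ definition above) =====
theorem ab_eq (factors : List Int) : squarefree_numbers factors = squarefree_numbers_alt factors := by
  induction factors with
  | nil => rfl
  | cons a rest ih => simp [squarefree_numbers, alt_cons, ih]

theorem squarefree_numbers_spec : Claim_equal_squarefree_numbers :=
  fun factors _ => ab_eq factors
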